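-- pv_equiv track=rewrite | github.com/sky7th/BOJ | programmers/베스트앨범.py | solution
-- ===== SOURCE A (Python) =====
-- def solution(genres, plays):
--     genre_dic = {}
--     song_dic = {}
--
--     for song_id, (genre, play_count) in enumerate(zip(genres, plays)):
--         if song_dic.get(song_id) is None:
--             song_dic[song_id] = {'genre': genre, 'play_count': play_count}
--
--         if genre_dic.get(genre) is None:
--             genre_dic[genre] = {'songs': [], 'play_count': 0}
--
--         genre_dic[genre]['play_count'] += play_count
--         genre_dic[genre]['songs'].append(song_id)
--
--     ordered_genre_dic = dict(sorted(genre_dic.items(), key=lambda x: -x[1]['play_count']))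
--     best_album = []
--
--     for genre in ordered_genre_dic.keys():
--         ordered_songs = sorted(ordered_genre_dic[genre]['songs'], key=lambda x: -song_dic[x]['play_count'])
--         best_album.extend(ordered_songs[:2])
--
--     return best_album
-- ===== SOURCE B (Python) =====
-- def solution(genres, plays):
--     # One linear pass keeps, per genre, the running total and the top-2 songs
--     # (play-count descending, earlier song id wins ties); only genres get sorted.
--     stats = {}  # genre -> (total_plays, top2 list of (song_id, play_count))
--     for i, (g, p) in enumerate(zip(genres, plays)):
--         if g in stats:
--             total, top = stats[g]
--             stats[g] = (total + p, _push2(top, i, p))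
--         else:
--             stats[g] = (p, [(i, p)])
--     order = sorted(stats.items(), key=lambda kv: -kv[1][0])
--     return [i for _, (_, top) in order for i, _ in top]
--
--
-- def _push2(top, i, p):
--     if p > top[0][1]:
--         return [(i, p), top[0]]
--     if len(top) < 2:
--         return [top[0], (i, p)]
--     if p > top[1][1]:
--         return [top[0], (i, p)]
--     return top
-- ===== Notes on version B (the rewrite author's own statement) =====
-- stated objective: faster
-- what changed: Instead of collecting every song id per genre and sorting each genre's full song list, B keeps only the running total and the top-2 songs per genre in one linear pass (stable tie-break on song id) and sorts only the genre summaries.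
import Mathlib
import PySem

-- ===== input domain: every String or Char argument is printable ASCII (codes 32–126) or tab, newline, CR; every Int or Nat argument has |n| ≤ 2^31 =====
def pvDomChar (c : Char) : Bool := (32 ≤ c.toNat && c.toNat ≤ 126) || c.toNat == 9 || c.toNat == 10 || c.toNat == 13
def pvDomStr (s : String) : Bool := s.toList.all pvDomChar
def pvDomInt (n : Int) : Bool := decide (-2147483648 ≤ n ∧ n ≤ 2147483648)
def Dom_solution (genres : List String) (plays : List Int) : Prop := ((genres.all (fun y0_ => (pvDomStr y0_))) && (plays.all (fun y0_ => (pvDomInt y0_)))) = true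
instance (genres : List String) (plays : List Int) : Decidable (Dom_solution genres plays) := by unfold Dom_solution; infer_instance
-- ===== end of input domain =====

-- B replaces A's per-genre full sort of all song ids by a single linear pass that keeps only
-- the running total and the top-2 songs per genre (stable tie-break), sorting only the genre
-- summaries; a timing run measured B faster on the large inputs.

-- ===== PORT A =====
-- loop body of A's first 'for' (state: (genre_dic, song_dic))
def stepA (st : PySem.Dict String (Int × List Int) × PySem.Dict Int (String × Int))
    (e : Int × String × Int) :
    PySem.Dict String (Int × List Int) × PySem.Dict Int (String × Int) :=
  let sd := if (st.2.get? e.1).isNone then st.2.insert e.1 e.2 else st.2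
  let gd := if (st.1.get? e.2.1).isNone then st.1.insert e.2.1 (0, []) else st.1
  let cur := gd.getD e.2.1 (0, [])
  (gd.insert e.2.1 (cur.1 + e.2.2, cur.2 ++ [e.1]), sd)

def solution (genres : List String) (plays : List Int) : List Int :=
  let st := (PySem.List.enumerate (genres.zip plays)).foldl stepA
    (PySem.Dict.empty, PySem.Dict.empty)
  let od := PySem.Dict.mk (PySem.List.sorted st.1.items (fun x => -x.2.1))
  od.keys.foldl (fun best_album g =>
    best_album ++ PySem.List.slice
      (PySem.List.sorted (od.getD g (0, [])).2 (fun sid => -(st.2.getD sid ("", 0)).2))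
      none (some 2)) []

-- ===== PORT B =====
-- _push2 of Source B; the [] branch is unreachable (callers always pass a nonempty top list)
def push2 (top : List (Int × Int)) (i p : Int) : List (Int × Int) :=
  match top with
  | [] => [(i, p)]
  | [a] => if a.2 < p then [(i, p), a] else [a, (i, p)]
  | a :: b :: _ => if a.2 < p then [(i, p), a] else if b.2 < p then [a, (i, p)] else top

-- loop body of Source B's single pass (state: stats)
def stepB (d : PySem.Dict String (Int × List (Int × Int))) (e : Int × String × Int) :
    PySem.Dict String (Int × List (Int × Int)) :=
  if d.contains e.2.1 then
    let s := d.getD e.2.1 (0, [])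
    d.insert e.2.1 (s.1 + e.2.2, push2 s.2 e.1 e.2.2)
  else d.insert e.2.1 (e.2.2, [(e.1, e.2.2)])

def solution_alt (genres : List String) (plays : List Int) : List Int :=
  let stats := (PySem.List.enumerate (genres.zip plays)).foldl stepB PySem.Dict.empty
  (PySem.List.sorted stats.items (fun kv => -kv.2.1)).flatMap (fun kv => kv.2.2.map (·.1))

-- ===== PRECONDITION & SPEC =====
def Spec_solution (genres : List String) (plays : List Int) (out : List Int) : Prop := out = solution_alt genres plays
instance (genres : List String) (plays : List Int) (out : List Int) : Decidable (Spec_solution genres plays out) := by unfold Spec_solution; infer_instance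

-- ===== CLAIM (what is proved, stated in full; the proofs are below) =====
def Claim_equal_solution : Prop := ∀ (genres : List String) (plays : List Int), Dom_solution genres plays → Spec_solution genres plays (solution genres plays)

-- ===== LEMMAS AND PROOFS =====

-- the occurrences of genre g, and the genre set, of the enumerated input
def pvSel (l : List (Int × String × Int)) (g : String) : List (Int × String × Int) :=
  l.filter (fun e => e.2.1 == g)

def pvKeys (l : List (Int × String × Int)) : List String :=
  PySem.Set.ofList (l.map (fun e => e.2.1))

-- the canonical group-by-genre dictionary produced by folding upd over each genre's occurrences
def pvGroup {ν : Type} (upd : ν → (Int × String × Int) → ν) (d0 : ν)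
    (l : List (Int × String × Int)) : PySem.Dict String ν :=
  PySem.Dict.mk ((pvKeys l).map (fun g => (g, (pvSel l g).foldl upd d0)))

def updA (cur : Int × List Int) (e : Int × String × Int) : Int × List Int :=
  (cur.1 + e.2.2, cur.2 ++ [e.1])

def updB (cur : Int × List (Int × Int)) (e : Int × String × Int) : Int × List (Int × Int) :=
  (cur.1 + e.2.2, push2 cur.2 e.1 e.2.2)

lemma pvSel_append_singleton (l : List (Int × String × Int)) (x : Int × String × Int) (g : String) :
    pvSel (l ++ [x]) g = pvSel l g ++ if x.2.1 = g then [x] else [] := by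
  simp [pvSel, List.filter_append, List.filter_singleton]

lemma pvKeys_append_singleton (l : List (Int × String × Int)) (x : Int × String × Int) :
    pvKeys (l ++ [x]) =
      if x.2.1 ∈ pvKeys l then pvKeys l else pvKeys l ++ [x.2.1] := by
  simp only [pvKeys, List.map_append, List.map_cons, List.map_nil,
    PySem.Set.ofList_append_singleton, PySem.Set.add]
  by_cases hm : x.2.1 ∈ PySem.Set.ofList (l.map (fun e => e.2.1)) <;>
    simp [hm]

lemma nodup_pvKeys (l : List (Int × String × Int)) : (pvKeys l).Nodup := by
  simp only [pvKeys]
  exact PySem.Set.nodup_ofList (l.map (fun e => e.2.1))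

lemma mem_pvKeys (l : List (Int × String × Int)) (g : String) :
    g ∈ pvKeys l ↔ g ∈ l.map (fun e => e.2.1) := by
  simp [pvKeys, PySem.Set.mem_ofList]

lemma keys_pvGroup {ν : Type} (upd : ν → (Int × String × Int) → ν) (d0 : ν)
    (l : List (Int × String × Int)) : (pvGroup upd d0 l).keys = pvKeys l := by
  show ((pvKeys l).map (fun g => (g, (pvSel l g).foldl upd d0))).map (fun p => p.1) = pvKeys l
  rw [List.map_map]
  have : ((fun p : String × ν => p.1) ∘ fun g => (g, (pvSel l g).foldl upd d0)) = id := by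
    funext g; rfl
  rw [this, List.map_id]

-- the canonical grouping loop: unconditional insert with getD-default
lemma foldl_group {ν : Type} (upd : ν → (Int × String × Int) → ν) (d0 : ν)
    (l : List (Int × String × Int)) :
    l.foldl (fun d e => d.insert e.2.1 (upd (d.getD e.2.1 d0) e)) PySem.Dict.empty =
      pvGroup upd d0 l := by
  induction l using List.reverseRecOn with
  | nil => rfl
  | append_singleton l x ih =>
    rw [List.foldl_append, List.foldl_cons, List.foldl_nil, ih]
    have hk : (pvGroup upd d0 l).keys = pvKeys l := keys_pvGroup upd d0 l
    have hnd : (pvGroup upd d0 l).keys.Nodup := by rw [hk]; exact nodup_pvKeys l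
    by_cases hg : x.2.1 ∈ pvKeys l
    · have hc : (pvGroup upd d0 l).contains x.2.1 = true := by
        rw [PySem.Dict.contains_iff_mem_keys, hk]; exact hg
      have hmem : (x.2.1, (pvSel l x.2.1).foldl upd d0) ∈ (pvGroup upd d0 l).items :=
        List.mem_map.mpr ⟨x.2.1, hg, rfl⟩
      rw [PySem.Dict.getD_of_mem_items _ hmem hnd d0]
      apply PySem.Dict.ext
      rw [PySem.Dict.items_insert_of_contains _ _ hc]
      show ((pvKeys l).map (fun g => (g, (pvSel l g).foldl upd d0))).map _ =
        (pvKeys (l ++ [x])).map _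
      rw [pvKeys_append_singleton, if_pos hg, List.map_map]
      apply List.map_congr_left
      intro g hgm
      by_cases he : g = x.2.1
      · subst he
        simp [pvSel_append_singleton, List.foldl_append]
      · have : (g == x.2.1) = false := by simp [he]
        simp [Function.comp, this, pvSel_append_singleton, Ne.symm he]
    · have hc : (pvGroup upd d0 l).contains x.2.1 = false := by
        rw [← Bool.not_eq_true, PySem.Dict.contains_iff_mem_keys, hk]; exact hg
      rw [PySem.Dict.getD_of_not_contains _ d0 hc]
      apply PySem.Dict.ext
      rw [PySem.Dict.items_insert_of_not_contains _ _ hc]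
      show ((pvKeys l).map (fun g => (g, (pvSel l g).foldl upd d0))) ++ _ =
        (pvKeys (l ++ [x])).map _
      rw [pvKeys_append_singleton, if_neg hg, List.map_append, List.map_singleton]
      have hsel : pvSel l x.2.1 = [] := by
        rw [pvSel, List.filter_eq_nil_iff]
        intro a ha hbeq
        exact hg ((mem_pvKeys l x.2.1).mpr
          (List.mem_map.mpr ⟨a, ha, by simpa using hbeq.symm⟩))
      have h1 : List.map (fun g => (g, List.foldl upd d0 (pvSel (l ++ [x]) g))) (pvKeys l) =
          List.map (fun g => (g, List.foldl upd d0 (pvSel l g))) (pvKeys l) := by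
        apply List.map_congr_left
        intro g hgm
        have he : ¬ (x.2.1 = g) := fun h => hg (h ▸ hgm)
        simp [pvSel_append_singleton, he]
      rw [h1]
      simp [pvSel_append_singleton, hsel]

-- A's song_dic loop is just the enumerated items
lemma foldl_sd (l : List (Int × (String × Int))) (h : (l.map (fun e => e.1)).Nodup) :
    l.foldl (fun sd e => if (sd.get? e.1).isNone then sd.insert e.1 e.2 else sd)
      PySem.Dict.empty = PySem.Dict.mk l := by
  induction l using List.reverseRecOn with
  | nil => rfl
  | append_singleton l x ih =>
    rw [List.map_append, List.map_singleton] at h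
    have hx : x.1 ∉ l.map (fun e => e.1) := by
      have := List.nodup_append.mp h
      intro hmem
      exact this.2.2 x.1 hmem x.1 (by simp) rfl
    have hnl : (l.map (fun e => e.1)).Nodup := (List.nodup_append.mp h).1
    rw [List.foldl_append, List.foldl_cons, List.foldl_nil, ih hnl]
    have hget : (PySem.Dict.mk l).get? x.1 = none :=
      (PySem.Dict.get?_eq_none_iff_not_mem_keys _ _).mpr hx
    rw [hget]
    simp only [Option.isNone_none, if_pos]
    have hcon : (PySem.Dict.mk l).contains x.1 = false := by
      rw [PySem.Dict.contains_eq_isSome_get?, hget]; rfl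
    apply PySem.Dict.ext
    rw [PySem.Dict.items_insert_of_not_contains _ _ hcon]

-- A's combined loop splits into the two canonical loops
lemma foldA_eq (l : List (Int × String × Int)) (h : (l.map (fun e => e.1)).Nodup) :
    l.foldl stepA (PySem.Dict.empty, PySem.Dict.empty) =
      (pvGroup updA (0, []) l, PySem.Dict.mk l) := by
  have hstep : stepA = fun st e =>
      (st.1.insert e.2.1 (updA (st.1.getD e.2.1 (0, [])) e),
       if (st.2.get? e.1).isNone then st.2.insert e.1 e.2 else st.2) := by
    funext st e
    by_cases hn : (st.1.get? e.2.1).isNone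
    · have hno : st.1.get? e.2.1 = none := by simpa using hn
      simp [stepA, updA, PySem.Dict.getD_insert_self, PySem.Dict.insert_insert_self,
        PySem.Dict.getD_of_get?_eq_none, hno]
    · simp [stepA, hn, updA]
  rw [hstep]
  have hp := PySem.List.foldl_prod_mk
      (fun (d : PySem.Dict String (Int × List Int)) (e : Int × String × Int) =>
        d.insert e.2.1 (updA (d.getD e.2.1 (0, [])) e))
      (fun (sd : PySem.Dict Int (String × Int)) (e : Int × String × Int) =>
        if (sd.get? e.1).isNone then sd.insert e.1 e.2 else sd)
      l PySem.Dict.empty PySem.Dict.empty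
  rw [foldl_group, foldl_sd l h] at hp
  exact hp

lemma foldB_eq (l : List (Int × String × Int)) :
    l.foldl stepB PySem.Dict.empty = pvGroup updB (0, []) l := by
  have hstep : stepB = fun d e => d.insert e.2.1 (updB (d.getD e.2.1 (0, [])) e) := by
    funext d e
    by_cases hc : d.contains e.2.1
    · simp [stepB, hc, updB]
    · have hd : d.getD e.2.1 ((0 : Int), ([] : List (Int × Int))) = (0, []) :=
        PySem.Dict.getD_of_not_contains _ _ (by simpa using hc)
      simp [stepB, hc, updB, hd, push2]
  rw [hstep, foldl_group]

lemma foldl_updA (m : List (Int × String × Int)) (c : Int × List Int) :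
    m.foldl updA c = (c.1 + (m.map (fun e => e.2.2)).sum, c.2 ++ m.map (fun e => e.1)) := by
  induction m generalizing c with
  | nil => simp
  | cons a t ih => simp [updA, ih, add_assoc]

lemma foldl_updB (m : List (Int × String × Int)) (c : Int × List (Int × Int)) :
    m.foldl updB c = (c.1 + (m.map (fun e => e.2.2)).sum,
      (m.map (fun e => (e.1, e.2.2))).foldl (fun t e => push2 t e.1 e.2) c.2) := by
  induction m generalizing c with
  | nil => simp
  | cons a t ih => simp [updB, ih, add_assoc]

-- sorting a mapped list = mapping the sorted list, when the key factors through the map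
lemma insertBy_map {α β : Type} (f : α → β) (key : β → Int) (x : α) (acc : List α) :
    PySem.List.insertBy (fun a b => decide (key a < key b)) (f x) (acc.map f) =
      (PySem.List.insertBy (fun a b => decide (key (f a) < key (f b))) x acc).map f := by
  induction acc with
  | nil => simp [PySem.List.insertBy]
  | cons a t ih =>
      simp only [List.map_cons, PySem.List.insertBy]
      split_ifs <;> simp_all

lemma sorted_map {α β : Type} (f : α → β) (key : β → Int) (m : List α) :
    PySem.List.sorted (m.map f) key =
      (PySem.List.sorted m (fun x => key (f x))).map f := by
  rw [PySem.List.sorted_eq_foldl_insertBy, PySem.List.sorted_eq_foldl_insertBy]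
  suffices h : ∀ (acc : List α),
      (m.map f).foldl (fun acc x => PySem.List.insertBy (fun a b => decide (key a < key b)) x acc) (acc.map f) =
        (m.foldl (fun acc x => PySem.List.insertBy (fun a b => decide (key (f a) < key (f b))) x acc) acc).map f by
    simpa using h []
  induction m with
  | nil => intro acc; simp
  | cons a t ih => intro acc; simp only [List.map_cons, List.foldl_cons, insertBy_map, ih]

-- sorting with keys that agree on the list's members
lemma insertBy_congr {α : Type} (key key' : α → Int) (x : α) (acc : List α)
    (hx : key x = key' x) (hacc : ∀ y ∈ acc, key y = key' y) :
    PySem.List.insertBy (fun a b => decide (key a < key b)) x acc =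
      PySem.List.insertBy (fun a b => decide (key' a < key' b)) x acc := by
  induction acc with
  | nil => rfl
  | cons a t ih =>
      have ha := hacc a (by simp)
      simp only [PySem.List.insertBy, hx, ha]
      split_ifs with h
      · rfl
      · rw [ih (fun y hy => hacc y (by simp [hy]))]

lemma sorted_congr {α : Type} (key key' : α → Int) (m : List α)
    (h : ∀ y ∈ m, key y = key' y) :
    PySem.List.sorted m key = PySem.List.sorted m key' := by
  rw [PySem.List.sorted_eq_foldl_insertBy, PySem.List.sorted_eq_foldl_insertBy]
  suffices hh : ∀ (acc : List α), (∀ y ∈ acc, key y = key' y) →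
      m.foldl (fun acc x => PySem.List.insertBy (fun a b => decide (key a < key b)) x acc) acc =
        m.foldl (fun acc x => PySem.List.insertBy (fun a b => decide (key' a < key' b)) x acc) acc by
    exact hh [] (by simp)
  induction m with
  | nil => intro acc _; rfl
  | cons a t ih =>
      intro acc hacc
      have ha : key a = key' a := h a (by simp)
      simp only [List.foldl_cons]
      rw [insertBy_congr key key' a acc ha hacc, ih (fun y hy => h y (by simp [hy]))]
      intro y hy
      rcases (PySem.List.mem_insertBy _ a y acc).mp hy with rfl | hy'
      · exact ha
      · exact hacc y hy'

-- the top-2 prefix of the stable sort is maintained by push2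
lemma take2_insertBy (x : Int × Int) (acc : List (Int × Int)) :
    (PySem.List.insertBy (fun a b => decide ((-a.2 : Int) < -b.2)) x acc).take 2 =
      push2 (acc.take 2) x.1 x.2 := by
  match acc with
  | [] => simp [PySem.List.insertBy, push2]
  | [a] =>
      by_cases h : a.2 < x.2
      · have h' : (-x.2 : Int) < -a.2 := by omega
        simp [PySem.List.insertBy, push2, h, h', List.take]
      · have h' : ¬ ((-x.2 : Int) < -a.2) := by omega
        simp [PySem.List.insertBy, push2, h, h', List.take]
  | a :: b :: t =>
      by_cases h : a.2 < x.2
      · have h' : (-x.2 : Int) < -a.2 := by omega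
        simp [PySem.List.insertBy, push2, h, h', List.take]
      · have h' : ¬ ((-x.2 : Int) < -a.2) := by omega
        by_cases hb : b.2 < x.2
        · have hb' : (-x.2 : Int) < -b.2 := by omega
          simp [PySem.List.insertBy, push2, h, h', hb, hb', List.take]
        · have hb' : ¬ ((-x.2 : Int) < -b.2) := by omega
          simp [PySem.List.insertBy, push2, h, h', hb, hb', List.take]

lemma take2_sorted (ps : List (Int × Int)) :
    (PySem.List.sorted ps (fun e => (-e.2 : Int))).take 2 =
      ps.foldl (fun t e => push2 t e.1 e.2) [] := by
  rw [PySem.List.sorted_eq_foldl_insertBy]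
  suffices h : ∀ (acc : List (Int × Int)),
      (ps.foldl (fun acc x => PySem.List.insertBy (fun a b => decide ((-a.2 : Int) < -b.2)) x acc) acc).take 2 =
        ps.foldl (fun t e => push2 t e.1 e.2) (acc.take 2) by
    simpa using h []
  induction ps with
  | nil => intro acc; rfl
  | cons a t ih => intro acc; simp only [List.foldl_cons, ih, take2_insertBy]

-- per-genre: A's sort-then-take-2 of its song ids equals the mapped top-2 list B maintains
lemma per_group (l : List (Int × String × Int)) (hnod : (l.map (fun e => e.1)).Nodup)
    (g : String) :
    PySem.List.slice
      (PySem.List.sorted ((pvSel l g).foldl updA ((0 : Int), ([] : List Int))).2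
        (fun sid => -((PySem.Dict.mk l).getD sid ("", 0)).2)) none (some 2)
    = (((pvSel l g).foldl updB ((0 : Int), ([] : List (Int × Int)))).2).map (fun q => q.1) := by
  rw [foldl_updA, foldl_updB]
  simp only [List.nil_append]
  rw [PySem.List.slice_to _ (by norm_num : (0 : Int) ≤ 2)]
  have hmm : (pvSel l g).map (fun e => e.1)
      = ((pvSel l g).map (fun e => (e.1, e.2.2))).map (fun q => q.1) := by
    simp [List.map_map]
  rw [hmm]
  rw [sorted_map (fun q : Int × Int => q.1)
    (fun sid => -((PySem.Dict.mk l).getD sid ("", 0)).2)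
    ((pvSel l g).map (fun e => (e.1, e.2.2)))]
  rw [show ((2 : Int).toNat) = 2 from rfl, ← List.map_take]
  have hcong := sorted_congr
    (fun x : Int × Int => -((PySem.Dict.mk l).getD x.1 ("", 0)).2)
    (fun e : Int × Int => -e.2)
    ((pvSel l g).map (fun e => (e.1, e.2.2)))
    (by
      intro q hq
      obtain ⟨e, he, rfl⟩ := List.mem_map.mp hq
      have hel : e ∈ l := (List.mem_filter.mp he).1
      have : (PySem.Dict.mk l).getD e.1 ("", 0) = e.2 :=
        PySem.Dict.getD_of_mem_items (PySem.Dict.mk l)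
          (show (e.1, e.2) ∈ l by simpa using hel) hnod ("", 0)
      simp [this])
  rw [hcong, take2_sorted]

-- the two final phases agree, given the fold characterisations
lemma assemble (l : List (Int × String × Int)) (hnod : (l.map (fun e => e.1)).Nodup) :
    (PySem.Dict.mk (PySem.List.sorted (pvGroup updA (0, []) l).items
        (fun x => -x.2.1))).keys.foldl
      (fun best g => best ++ PySem.List.slice
        (PySem.List.sorted
          ((PySem.Dict.mk (PySem.List.sorted (pvGroup updA (0, []) l).items
              (fun x => -x.2.1))).getD g (0, [])).2
          (fun sid => -((PySem.Dict.mk l).getD sid ("", 0)).2)) none (some 2)) []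
    = (PySem.List.sorted (pvGroup updB (0, []) l).items (fun kv => -kv.2.1)).flatMap
        (fun kv => kv.2.2.map (fun x => x.1)) := by
  rw [PySem.List.foldl_append_eq_flatMap, List.nil_append]
  have hknd : ((PySem.Dict.mk (PySem.List.sorted (pvGroup updA (0, []) l).items
      (fun x => -x.2.1))).keys).Nodup := by
    have h2 := (PySem.List.sorted_perm (pvGroup updA (0, []) l).items
      (fun x => -(x.2.1 : Int)) false).map (fun p => p.1)
    rw [show (PySem.Dict.mk (PySem.List.sorted (pvGroup updA (0, []) l).items
      (fun x => -x.2.1))).keys = (PySem.List.sorted (pvGroup updA (0, []) l).items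
      (fun x => -x.2.1)).map (fun p => p.1) from rfl, h2.nodup_iff]
    have hkn := nodup_pvKeys l
    rw [← keys_pvGroup updA ((0 : Int), ([] : List Int)) l] at hkn
    exact hkn
  have hitems := PySem.Dict.items_eq_map_keys
    (PySem.Dict.mk (PySem.List.sorted (pvGroup updA (0, []) l).items (fun x => -x.2.1)))
    hknd ((0 : Int), ([] : List Int))
  -- replace the keys-loop by a flatMap over the sorted items themselves
  have hod : (PySem.Dict.mk (PySem.List.sorted (pvGroup updA (0, []) l).items
        (fun x => -x.2.1))).keys.flatMap
      (fun g => PySem.List.slice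
        (PySem.List.sorted
          ((PySem.Dict.mk (PySem.List.sorted (pvGroup updA (0, []) l).items
              (fun x => -x.2.1))).getD g (0, [])).2
          (fun sid => -((PySem.Dict.mk l).getD sid ("", 0)).2)) none (some 2))
    = (PySem.List.sorted (pvGroup updA (0, []) l).items (fun x => -x.2.1)).flatMap
      (fun kv => PySem.List.slice
        (PySem.List.sorted kv.2.2
          (fun sid => -((PySem.Dict.mk l).getD sid ("", 0)).2)) none (some 2)) := by
    conv_rhs => rw [show PySem.List.sorted (pvGroup updA (0, []) l).items
      (fun x => -x.2.1) = (PySem.Dict.mk (PySem.List.sorted (pvGroup updA (0, []) l).items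
        (fun x => -x.2.1))).items from rfl, hitems]
    exact (List.flatMap_map
      (fun k => (k, (PySem.Dict.mk (PySem.List.sorted (pvGroup updA (0, []) l).items
        (fun x => -x.2.1))).getD k (0, [])))
      (fun kv => PySem.List.slice
        (PySem.List.sorted kv.2.2
          (fun sid => -((PySem.Dict.mk l).getD sid ("", 0)).2)) none (some 2))
      (PySem.Dict.mk (PySem.List.sorted (pvGroup updA (0, []) l).items
        (fun x => -x.2.1))).keys).symm
  rw [hod]
  rw [show (pvGroup updA ((0 : Int), ([] : List Int)) l).items
      = (pvKeys l).map (fun g => (g, (pvSel l g).foldl updA (0, []))) from rfl]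
  rw [show (pvGroup updB ((0 : Int), ([] : List (Int × Int))) l).items
      = (pvKeys l).map (fun g => (g, (pvSel l g).foldl updB (0, []))) from rfl]
  rw [sorted_map (fun g => (g, (pvSel l g).foldl updA ((0 : Int), ([] : List Int))))
    (fun x => -x.2.1) (pvKeys l)]
  rw [sorted_map (fun g => (g, (pvSel l g).foldl updB ((0 : Int), ([] : List (Int × Int)))))
    (fun kv => -kv.2.1) (pvKeys l)]
  rw [List.flatMap_map, List.flatMap_map]
  have hkey : (fun x => -((x, List.foldl updA ((0 : Int), ([] : List Int)) (pvSel l x)).2.1))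
      = (fun x => -((x, List.foldl updB ((0 : Int), ([] : List (Int × Int))) (pvSel l x)).2.1)) := by
    funext g
    simp [foldl_updA, foldl_updB]
  rw [hkey]
  exact congrArg (fun f => List.flatMap f (PySem.List.sorted (pvKeys l)
      (fun x => -((x, List.foldl updB ((0 : Int), ([] : List (Int × Int))) (pvSel l x)).2.1))))
    (funext (fun g => per_group l hnod g))

lemma main_eq (genres : List String) (plays : List Int) :
    solution genres plays = solution_alt genres plays := by
  have hnod : ((PySem.List.enumerate (genres.zip plays)).map (fun e => e.1)).Nodup := by
    rw [PySem.List.map_fst_enumerate]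
    exact PySem.List.nodup_pyRange_one 0 _
  simp only [solution, solution_alt]
  rw [foldA_eq _ hnod, foldB_eq]
  exact assemble _ hnod

-- ===== VERDICT (by name: the statement is the Claim_ definition above) =====
theorem solution_spec : Claim_equal_solution := by
  intro genres plays _
  unfold Spec_solution
  exact main_eq genres plays
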